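-- pv_equiv track=rewrite | github.com/jonathan959/eirin1111 | strategies.py | lower_lows_persistence
-- ===== SOURCE A (Python) =====
-- from typing import Any, Dict, List, Optional, Tuple
--
-- def lower_lows_persistence(values: List[float], window: int = 5, periods: int = 8) -> bool:
--     if len(values) < window + periods:
--         return False
--     mins = []
--     for i in range(-periods, 0):
--         start = i - window + 1
--         segment = values[start:i + 1]
--         if not segment:
--             return False
--         mins.append(min(segment))
--     return all(earlier > later for earlier, later in zip(mins, mins[1:]))
-- ===== SOURCE B (Python) =====
-- def lower_lows_persistence(values, window=5, periods=8):
--     n = len(values)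
--     if n < window + periods:
--         return False
--     if periods <= 0:
--         return True
--     if window <= 0:
--         return False
--     # min of the earliest window (ending at index n - periods), then each newer
--     # window's min decreases iff each newly entering element beats the running min
--     prev = min(values[n - periods - window + 1 : n - periods + 1])
--     for x in values[n - periods + 1:]:
--         if x >= prev:
--             return False
--         prev = x
--     return True
-- ===== Notes on version B (the rewrite author's own statement) =====
-- stated objective: alternative
-- what changed: B replaces A's per-period window slicing with min() by one min over the earliest window followed by a single running-min pass over the last periods-1 values (each newer window's min decreases iff the newly entering value beats the running min), touching each element once instead of window times; B also fixes A's empty-slice bug.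
-- intended difference: On inputs with periods >= 1, window >= 1 and len(values) >= window+periods whose recent sliding-window minima are strictly decreasing, A returns False (its slice values[start:0] at i = -1 is always empty, so the 'if not segment: return False' guard fires and A can never return True when periods >= 1) while B returns True, the intended answer for a lower-lows persistence check. — e.g. on lower_lows_persistence([5, 4, 3, 2, 1], 2, 3): A returns false, B returns true
import Mathlib
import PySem

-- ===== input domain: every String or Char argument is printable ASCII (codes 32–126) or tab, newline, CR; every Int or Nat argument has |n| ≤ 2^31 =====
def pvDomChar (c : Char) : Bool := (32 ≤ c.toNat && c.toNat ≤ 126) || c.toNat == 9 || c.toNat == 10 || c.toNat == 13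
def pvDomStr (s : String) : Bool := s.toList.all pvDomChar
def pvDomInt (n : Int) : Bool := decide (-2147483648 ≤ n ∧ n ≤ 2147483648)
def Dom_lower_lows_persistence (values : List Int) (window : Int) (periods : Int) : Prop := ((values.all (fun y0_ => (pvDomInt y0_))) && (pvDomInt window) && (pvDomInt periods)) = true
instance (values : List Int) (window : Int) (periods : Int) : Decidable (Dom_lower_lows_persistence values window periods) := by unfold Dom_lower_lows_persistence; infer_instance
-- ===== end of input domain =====

-- B computes the earliest window's min once and then makes one running-min pass over the last
-- periods-1 values, instead of A's per-period window slicing with min(); B also fixes A's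
-- empty-slice bug (values[start:0] at i = -1 forces False whenever periods >= 1), see D_ below.

-- ===== PORT A =====
-- the loop 'for i in range(-periods, 0)': early 'return False' = none, normal end = some mins
def pvALoop (values : List Int) (window : Int) : List Int → List Int → Option (List Int)
  | [], mins => some mins
  | i :: rest, mins =>
      let segment := PySem.List.slice values (some (i - window + 1)) (some (i + 1))
      if segment = [] then none
      else
        -- min(segment): segment is nonempty here, so min? is some; the .getD 0 is never used
        pvALoop values window rest (mins ++ [(PySem.List.min? segment (fun y => y)).getD 0])

def lower_lows_persistence (values : List Int) (window : Int) (periods : Int) : Bool :=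
  if (values.length : Int) < window + periods then false
  else
    match pvALoop values window (PySem.List.pyRange (-periods) 0 1) [] with
    | none => false
    | some mins => (mins.zip mins.tail).all (fun p => decide (p.1 > p.2))

-- ===== PORT B =====
-- 'for x in values[n - periods + 1:]: if x >= prev: return False; prev = x'
def pvBLoop : List Int → Int → Bool
  | [], _ => true
  | x :: rest, prev => if x ≥ prev then false else pvBLoop rest x

def lower_lows_persistence_alt (values : List Int) (window : Int) (periods : Int) : Bool :=
  let n : Int := values.length
  if n < window + periods then false
  else if periods ≤ 0 then true
  else if window ≤ 0 then false
  else
    let prev := (PySem.List.min?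
        (PySem.List.slice values (some (n - periods - window + 1)) (some (n - periods + 1)))
        (fun y => y)).getD 0
    pvBLoop (PySem.List.slice values (some (n - periods + 1)) none) prev

-- ===== PRECONDITION & SPEC =====
-- On inputs with periods ≥ 1, window ≥ 1 and len(values) ≥ window+periods whose recent window
-- minima really are strictly decreasing, A returns False (its slice values[start:0] at i = -1 is
-- always empty, so the empty-segment guard fires) while B returns True, the intended answer.
def D_lower_lows_persistence (values : List Int) (window : Int) (periods : Int) : Prop :=
  let m := values.length - periods.toNat
  1 ≤ window ∧ 1 ≤ periods ∧ window + periods ≤ (values.length : Int) ∧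
  List.IsChain (· > ·) (values.drop m) ∧
  (periods = 1 ∨
    ∀ y ∈ (values.drop (m + 1 - window.toNat)).take window.toNat, values.getD (m + 1) 0 < y)
instance (values : List Int) (window : Int) (periods : Int) : Decidable (D_lower_lows_persistence values window periods) := by unfold D_lower_lows_persistence; infer_instance

def Spec_lower_lows_persistence (values : List Int) (window : Int) (periods : Int) (out : Bool) : Prop := ¬ D_lower_lows_persistence values window periods → out = lower_lows_persistence_alt values window periods
instance (values : List Int) (window : Int) (periods : Int) (out : Bool) : Decidable (Spec_lower_lows_persistence values window periods out) := by unfold Spec_lower_lows_persistence; infer_instance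

def pvDiffWitness_lower_lows_persistence : List Int × Int × Int := ([5, 4, 3, 2, 1], 2, 3)
def pvDiffWitnessOut_lower_lows_persistence : Bool × Bool := (false, true)

-- ===== CLAIM (what is proved, stated in full; the proofs are below) =====
def Claim_unchanged_lower_lows_persistence : Prop := ∀ (values : List Int) (window : Int) (periods : Int), Dom_lower_lows_persistence values window periods → Spec_lower_lows_persistence values window periods (lower_lows_persistence values window periods)
def Claim_changed_lower_lows_persistence : Prop := Dom_lower_lows_persistence (pvDiffWitness_lower_lows_persistence.1) (pvDiffWitness_lower_lows_persistence.2.1) (pvDiffWitness_lower_lows_persistence.2.2) ∧ D_lower_lows_persistence (pvDiffWitness_lower_lows_persistence.1) (pvDiffWitness_lower_lows_persistence.2.1) (pvDiffWitness_lower_lows_persistence.2.2) ∧ lower_lows_persistence (pvDiffWitness_lower_lows_persistence.1) (pvDiffWitness_lower_lows_persistence.2.1) (pvDiffWitness_lower_lows_persistence.2.2) = pvDiffWitnessOut_lower_lows_persistence.1 ∧ lower_lows_persistence_alt (pvDiffWitness_lower_lows_persistence.1) (pvDiffWitness_lower_lows_persistence.2.1) (pvDiffWitness_lower_lows_persistence.2.2)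 = pvDiffWitnessOut_lower_lows_persistence.2 ∧ pvDiffWitnessOut_lower_lows_persistence.1 ≠ pvDiffWitnessOut_lower_lows_persistence.2
def Claim_exact_lower_lows_persistence : Prop := ∀ (values : List Int) (window : Int) (periods : Int), Dom_lower_lows_persistence values window periods → D_lower_lows_persistence values window periods → lower_lows_persistence values window periods ≠ lower_lows_persistence_alt values window periods

-- ===== LEMMAS AND PROOFS =====

-- the slice values[start:0] is empty for every start
lemma pv_slice_stop_zero (xs : List Int) (a : Int) :
    PySem.List.slice xs (some a) (some 0) = [] := by
  simp [PySem.List.slice, PySem.List.clampIdx]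

-- if -1 is among the remaining indices, A's loop hits an empty segment and early-returns
lemma pvALoop_none (values : List Int) (window : Int) :
    ∀ is mins, (-1 : Int) ∈ is → pvALoop values window is mins = none := by
  intro is
  induction is with
  | nil => intro mins h; simp at h
  | cons i rest ih =>
    intro mins h
    rw [pvALoop]
    by_cases hi : i = (-1 : Int)
    · subst hi
      simp [show (-1 : Int) + 1 = 0 by ring, pv_slice_stop_zero]
    · have hm : (-1 : Int) ∈ rest := by
        rcases List.mem_cons.mp h with h1 | h2
        · exact absurd h1.symm hi
        · exact h2
      split <;> simp [ih _ hm]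

-- A returns False whenever periods ≥ 1
lemma pvA_false (values : List Int) (window : Int) (periods : Int) (hp : 1 ≤ periods) :
    lower_lows_persistence values window periods = false := by
  unfold lower_lows_persistence
  split
  · rfl
  · rw [pvALoop_none values window _ [] (by rw [PySem.List.mem_pyRange_one]; omega)]

-- B's scan is the strict-descent check on prev :: rest
lemma pvBLoop_eq_chain (L : List Int) (prev : Int) :
    pvBLoop L prev = decide (List.IsChain (· > ·) (prev :: L)) := by
  induction L generalizing prev with
  | nil => simp [pvBLoop]
  | cons x rest ih =>
    rw [pvBLoop, ih x]
    by_cases h : x ≥ prev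
    · simp [h, List.isChain_cons_cons]
    · simp [h, List.isChain_cons_cons]
      intro _
      omega

-- in the region periods ≥ 1 ∧ window ≥ 1 ∧ len ≥ window+periods, B decides D_'s condition
lemma pvB_iff (values : List Int) (window : Int) (periods : Int)
    (hw : 1 ≤ window) (hp : 1 ≤ periods) (hn : window + periods ≤ (values.length : Int)) :
    lower_lows_persistence_alt values window periods = true ↔
      D_lower_lows_persistence values window periods := by
  have hW : window.toNat = window := by omega
  have hP : periods.toNat = periods := by omega
  set n := values.length with hn0
  set W := window.toNat with hWdef
  set P := periods.toNat with hPdef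
  have h1 : 1 ≤ W := by omega
  have h2 : 1 ≤ P := by omega
  have h3 : W + P ≤ n := by omega
  -- the first window as drop/take
  have hfw : PySem.List.slice values (some ((n : Int) - periods - window + 1)) (some ((n : Int) - periods + 1))
      = (values.drop (n - P + 1 - W)).take W := by
    have e1 : ((n : Int) - periods - window + 1).toNat = n - P + 1 - W := by omega
    have e2 : ((n : Int) - periods + 1).toNat - (n - P + 1 - W) = W := by omega
    rw [PySem.List.slice_toNat, e1, e2] <;> omega
  -- the tail values[n-periods+1:]
  have htl : PySem.List.slice values (some ((n : Int) - periods + 1)) none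
      = values.drop (n - P + 1) := by
    have e3 : ((n : Int) - periods + 1).toNat = n - P + 1 := by omega
    rw [PySem.List.slice_from, e3]
    omega
  set fw := (values.drop (n - P + 1 - W)).take W with hfwdef
  have hfwlen : fw.length = W := by
    simp [hfwdef]
    omega
  have hfwne : fw ≠ [] := by
    intro h
    rw [h] at hfwlen
    simp at hfwlen
    omega
  obtain ⟨m, hm⟩ : ∃ m, PySem.List.min? fw (fun y => y) = some m := by
    rcases h : PySem.List.min? fw (fun y => y) with _ | m
    · exact absurd ((PySem.List.min?_eq_none_iff fw _).mp h) hfwne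
    · exact ⟨m, rfl⟩
  have hmmem : m ∈ fw := PySem.List.min?_mem hm
  have hmin : ∀ y ∈ fw, m ≤ y := PySem.List.min?_isMin hm
  -- t0 = values[n-P], last element of the first window and head of values.drop (n-P)
  have hnP : n - P < n := by omega
  have ht0 : values.drop (n - P) = values[n - P] :: values.drop (n - P + 1) :=
    List.drop_eq_getElem_cons hnP
  have ht0fw : values[n - P]'hnP ∈ fw := by
    rw [hfwdef, List.mem_iff_getElem]
    refine ⟨W - 1, by simp; omega, ?_⟩
    rw [List.getElem_take, List.getElem_drop]
    congr 1
    omega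
  have hmt0 : m ≤ values[n - P]'hnP := hmin _ ht0fw
  -- unfold B
  have halt : lower_lows_persistence_alt values window periods
      = pvBLoop (values.drop (n - P + 1)) m := by
    unfold lower_lows_persistence_alt
    rw [if_neg (by omega), if_neg (by omega), if_neg (by omega)]
    simp only [← hn0, hfw, htl, hm, Option.getD_some]
  rw [halt, pvBLoop_eq_chain, decide_eq_true_iff]
  show _ ↔ (1 ≤ window ∧ 1 ≤ periods ∧ window + periods ≤ (values.length : Int) ∧
    List.IsChain (· > ·) (values.drop (values.length - periods.toNat)) ∧
    (periods = 1 ∨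
      ∀ y ∈ (values.drop (values.length - periods.toNat + 1 - window.toNat)).take window.toNat,
        values.getD (values.length - periods.toNat + 1) 0 < y))
  rw [← hn0, ← hPdef, ← hWdef, ht0, ← hfwdef]
  by_cases hP1 : periods = 1
  · have hL : values.drop (n - P + 1) = [] := by
      have he : n - P + 1 = n := by omega
      rw [he, List.drop_length]
    rw [hL]
    simp only [hP1, true_or]
    simp [hw]
    omega
  · have hlt : n - P + 1 < n := by omega
    have hL : values.drop (n - P + 1) = values[n - P + 1] :: values.drop (n - P + 1 + 1) :=
      List.drop_eq_getElem_cons hlt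
    have hgd : values.getD (n - P + 1) 0 = values[n - P + 1] := List.getD_eq_getElem values 0 hlt
    rw [hL, hgd, List.isChain_cons_cons, List.isChain_cons_cons]
    constructor
    · intro hc
      refine ⟨hw, hp, hn, ⟨by omega, hc.2⟩, Or.inr fun y hy => ?_⟩
      have := hmin y hy
      omega
    · rintro ⟨-, -, -, hc, hd⟩
      rcases hd with hd | hd
      · exact absurd hd hP1
      · exact ⟨by have := hd m hmmem; omega, hc.2⟩

-- ===== VERDICT (by name: the statement is the Claim_ definition above) =====
theorem lower_lows_persistence_spec : Claim_unchanged_lower_lows_persistence := by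
  unfold Claim_unchanged_lower_lows_persistence
  intro values window periods _ hnd
  by_cases h1 : (values.length : Int) < window + periods
  · simp [lower_lows_persistence, lower_lows_persistence_alt, h1]
  · by_cases hp : periods ≤ 0
    · have hr : PySem.List.pyRange (-periods) 0 1 = [] :=
        PySem.List.pyRange_one_eq_nil (by omega)
      simp [lower_lows_persistence, lower_lows_persistence_alt, h1, hp, hr, pvALoop]
    · by_cases hw : window ≤ 0
      · rw [pvA_false values window periods (by omega)]
        simp [lower_lows_persistence_alt, h1, hp, hw]
      · have hne : lower_lows_persistence_alt values window periods ≠ true := fun h =>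
          hnd ((pvB_iff values window periods (by omega) (by omega) (by omega)).mp h)
        have hfalse : lower_lows_persistence_alt values window periods = false := by
          cases h : lower_lows_persistence_alt values window periods
          · rfl
          · exact absurd h hne
        rw [pvA_false values window periods (by omega), hfalse]

theorem lower_lows_persistence_changed : Claim_changed_lower_lows_persistence := by
  unfold Claim_changed_lower_lows_persistence; decide

theorem lower_lows_persistence_tight : Claim_exact_lower_lows_persistence := by
  unfold Claim_exact_lower_lows_persistence
  intro values window periods _ hD
  rw [pvA_false values window periods hD.2.1,
    (pvB_iff values window periods hD.1 hD.2.1 hD.2.2.1).mpr hD]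
  simp
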